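-- pv_equiv track=rewrite | github.com/adityarajsrv/GFG | Difficulty: Basic/Smaller and Larger/smaller-and-larger.py | getMoreAndLess
-- ===== SOURCE A (Python) =====
-- def getMoreAndLess(arr, target):
--     smaller = larger = 0
--     for i in arr:
--         if i>target:
--             larger += 1
--         elif i<target:
--             smaller += 1
--         elif i==target:
--             larger += 1
--             smaller += 1
--     result = [smaller, larger]
--
--     return result
-- ===== SOURCE B (Python) =====
-- def getMoreAndLess(arr, target):
--     # count strict sides once, derive the >=/<= counts by complement
--     n = len(arr)
--     strictly_less = sum(1 for x in arr if x < target)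
--     strictly_greater = sum(1 for x in arr if x > target)
--     return [n - strictly_greater, n - strictly_less]
-- ===== Notes on version B (the rewrite author's own statement) =====
-- stated objective: alternative
-- what changed: Replaces A's single accumulator loop with a three-way elif chain by two strict-count comprehensions and arithmetic complement (n - count) to obtain the <=/>= counts.
import Mathlib
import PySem

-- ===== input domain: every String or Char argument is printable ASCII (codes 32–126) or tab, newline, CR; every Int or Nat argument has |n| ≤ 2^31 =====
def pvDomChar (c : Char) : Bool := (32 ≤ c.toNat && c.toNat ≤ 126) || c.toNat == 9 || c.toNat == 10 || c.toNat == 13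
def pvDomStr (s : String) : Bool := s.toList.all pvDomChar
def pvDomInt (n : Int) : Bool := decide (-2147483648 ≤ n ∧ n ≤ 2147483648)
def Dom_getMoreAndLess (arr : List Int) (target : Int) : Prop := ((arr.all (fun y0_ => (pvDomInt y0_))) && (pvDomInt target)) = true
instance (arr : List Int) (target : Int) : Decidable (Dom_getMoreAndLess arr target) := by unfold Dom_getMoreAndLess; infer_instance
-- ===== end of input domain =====

-- B replaces A's single three-way elif accumulator loop by two strict-count passes
-- plus arithmetic complement (alternative decomposition, same O(n) cost).


-- ===== PORT A =====
-- literal port: one fold carrying (smaller, larger), branches in A's order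
def getMoreAndLess (arr : List Int) (target : Int) : List Int :=
  let p := arr.foldl (fun (s : Int × Int) i =>
    if i > target then (s.1, s.2 + 1)
    else if i < target then (s.1 + 1, s.2)
    else if i == target then (s.1 + 1, s.2 + 1)
    else s) (0, 0)
  [p.1, p.2]

-- ===== PORT B =====
-- literal port: two strict counts (the 0/1 generator sums), then complements
def getMoreAndLess_alt (arr : List Int) (target : Int) : List Int :=
  let n : Int := arr.length
  let strictlyLess : Int := arr.countP (fun x => decide (x < target))
  let strictlyGreater : Int := arr.countP (fun x => decide (x > target))
  [n - strictlyGreater, n - strictlyLess]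

-- ===== PRECONDITION & SPEC =====
def Spec_getMoreAndLess (arr : List Int) (target : Int) (out : List Int) : Prop := out = getMoreAndLess_alt arr target
instance (arr : List Int) (target : Int) (out : List Int) : Decidable (Spec_getMoreAndLess arr target out) := by unfold Spec_getMoreAndLess; infer_instance

-- ===== CLAIM (what is proved, stated in full; the proofs are below) =====
def Claim_equal_getMoreAndLess : Prop := ∀ (arr : List Int) (target : Int), Dom_getMoreAndLess arr target → Spec_getMoreAndLess arr target (getMoreAndLess arr target)

-- ===== LEMMAS AND PROOFS =====
-- A's fold from an arbitrary accumulator, characterised by strict counts.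
theorem foldA_eq (target : Int) (arr : List Int) : ∀ (a b : Int),
    arr.foldl (fun (s : Int × Int) i =>
      if i > target then (s.1, s.2 + 1)
      else if i < target then (s.1 + 1, s.2)
      else if i == target then (s.1 + 1, s.2 + 1)
      else s) (a, b)
    = (a + (arr.length : Int) - arr.countP (fun x => decide (x > target)),
       b + (arr.length : Int) - arr.countP (fun x => decide (x < target))) := by
  induction arr with
  | nil => intro a b; simp
  | cons x xs ih =>
    intro a b
    simp only [List.foldl_cons, List.countP_cons, List.length_cons]
    by_cases hgt : x > target
    · simp only [if_pos hgt]
      rw [ih]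
      have hlt : ¬ x < target := by omega
      simp [hgt, hlt]; constructor <;> push_cast <;> ring
    · simp only [if_neg hgt]
      by_cases hlt : x < target
      · simp only [if_pos hlt]
        rw [ih]
        simp [hgt, hlt]; constructor <;> push_cast <;> ring
      · have heq : x = target := by omega
        simp only [if_neg hlt, heq, beq_self_eq_true, if_pos]
        rw [ih]
        have h1 : ¬ target > target := by omega
        have h2 : ¬ target < target := by omega
        simp [h1, h2]; constructor <;> push_cast <;> ring

-- ===== VERDICT (by name: the statement is the Claim_ definition above) =====
theorem getMoreAndLess_spec : Claim_equal_getMoreAndLess := by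
  intro arr target _
  show getMoreAndLess arr target = getMoreAndLess_alt arr target
  simp only [getMoreAndLess, getMoreAndLess_alt, foldA_eq]
  simp
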